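-- pv_equiv track=rewrite | github.com/strato-space/fast-agent | src/fast_agent/cli/commands/demo.py | _build_mixed
-- ===== SOURCE A (Python) =====
-- def _build_mixed(lines: int) -> str:
--     lines = max(20, lines)
--     content: list[str] = [
--         "# Streaming Markdown Demo",
--         "",
--         "This is a local demo to stress the streaming renderer and viewport sizing.",
--         "",
--         "## Checklist",
--         "- Long paragraphs",
--         "- Lists",
--         "- Tables",
--         "- Code fences",
--         "",
--         "## Table Sample",
--         "| Column | Value |",
--         "| --- | --- |",
--         "| alpha | 1 |",
--         "| beta | 2 |",
--         "| gamma | 3 |",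
--         "",
--         "## Code Sample",
--         "```python",
--         "def add(a, b):",
--         "    return a + b",
--         "```",
--         "",
--         "## Repeating Section",
--     ]
--     filler = [
--         "### Notes",
--         "The quick brown fox jumps over the lazy dog.",
--         "A short paragraph keeps wrapping behavior visible across widths.",
--         "",
--         "- Point A: repeated for layout consistency.",
--         "- Point B: streaming should keep the newest content in view.",
--         "- Point C: watch for scrollback pollution.",
--         "",
--         "Inline `code` and **bold** markers should render correctly.",
--         "",
--     ]
--     while len(content) < lines:
--         content.extend(filler)
--     return "\n".join(content[:lines]) + "\n"
-- ===== SOURCE B (Python) =====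
-- def _build_mixed(lines: int) -> str:
--     n = max(20, lines)
--     header = [
--         "# Streaming Markdown Demo",
--         "",
--         "This is a local demo to stress the streaming renderer and viewport sizing.",
--         "",
--         "## Checklist",
--         "- Long paragraphs",
--         "- Lists",
--         "- Tables",
--         "- Code fences",
--         "",
--         "## Table Sample",
--         "| Column | Value |",
--         "| --- | --- |",
--         "| alpha | 1 |",
--         "| beta | 2 |",
--         "| gamma | 3 |",
--         "",
--         "## Code Sample",
--         "```python",
--         "def add(a, b):",
--         "    return a + b",
--         "```",
--         "",
--         "## Repeating Section",
--     ]
--     filler = [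
--         "### Notes",
--         "The quick brown fox jumps over the lazy dog.",
--         "A short paragraph keeps wrapping behavior visible across widths.",
--         "",
--         "- Point A: repeated for layout consistency.",
--         "- Point B: streaming should keep the newest content in view.",
--         "- Point C: watch for scrollback pollution.",
--         "",
--         "Inline `code` and **bold** markers should render correctly.",
--         "",
--     ]
--     h = len(header)
--     f = len(filler)
--     return "\n".join(
--         header[i] if i < h else filler[(i - h) % f] for i in range(n)
--     ) + "\n"
-- ===== Notes on version B (the rewrite author's own statement) =====
-- stated objective: simpler
-- what changed: Replaces A's while-loop that repeatedly extends the list with the filler block and then slices, by a single pass over range(lines) selecting each line by position (header[i] for i < len(header), else filler[(i-len(header)) % len(filler)]) joined directly.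
import Mathlib
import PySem

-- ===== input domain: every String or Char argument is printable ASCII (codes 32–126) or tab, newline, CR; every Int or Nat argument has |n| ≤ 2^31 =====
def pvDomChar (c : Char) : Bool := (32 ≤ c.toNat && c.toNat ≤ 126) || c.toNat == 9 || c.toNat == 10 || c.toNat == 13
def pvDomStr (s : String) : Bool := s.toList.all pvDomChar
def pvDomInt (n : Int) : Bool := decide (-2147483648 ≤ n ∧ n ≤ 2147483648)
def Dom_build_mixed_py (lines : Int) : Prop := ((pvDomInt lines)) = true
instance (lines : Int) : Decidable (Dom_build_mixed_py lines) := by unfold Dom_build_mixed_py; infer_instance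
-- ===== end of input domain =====

-- B replaces A's while-extend-then-slice loop by direct positional selection
-- (header[i] for i < 24, else filler[(i-24) % 10]) over range(lines); objective: simpler.

def pvHeader : List String := [
  "# Streaming Markdown Demo",
  "",
  "This is a local demo to stress the streaming renderer and viewport sizing.",
  "",
  "## Checklist",
  "- Long paragraphs",
  "- Lists",
  "- Tables",
  "- Code fences",
  "",
  "## Table Sample",
  "| Column | Value |",
  "| --- | --- |",
  "| alpha | 1 |",
  "| beta | 2 |",
  "| gamma | 3 |",
  "",
  "## Code Sample",
  "```python",
  "def add(a, b):",
  "    return a + b",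
  "```",
  "",
  "## Repeating Section"]

def pvFiller : List String := [
  "### Notes",
  "The quick brown fox jumps over the lazy dog.",
  "A short paragraph keeps wrapping behavior visible across widths.",
  "",
  "- Point A: repeated for layout consistency.",
  "- Point B: streaming should keep the newest content in view.",
  "- Point C: watch for scrollback pollution.",
  "",
  "Inline `code` and **bold** markers should render correctly.",
  ""]

-- ===== PORT A =====
-- the 'while len(content) < lines: content.extend(filler)' loop
def pvGrow (lines : Int) (content : List String) : List String :=
  if (content.length : Int) < lines then pvGrow lines (content ++ pvFiller) else content
termination_by (lines - content.length).toNat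
decreasing_by simp [pvFiller]; omega

def build_mixed_py (lines : Int) : String :=
  let lines := max 20 lines
  PySem.Str.join "\n" ((pvGrow lines pvHeader).take lines.toNat) ++ "\n"

-- ===== PORT B =====
def build_mixed_py_alt (lines : Int) : String :=
  let n := max 20 lines
  let h := pvHeader.length
  let f := pvFiller.length
  PySem.Str.join "\n"
    ((List.range n.toNat).map (fun i =>
      if i < h then pvHeader.getD i "" else pvFiller.getD ((i - h) % f) "")) ++ "\n"

-- ===== PRECONDITION & SPEC =====
def Spec_build_mixed_py (lines : Int) (out : String) : Prop := out = build_mixed_py_alt lines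
instance (lines : Int) (out : String) : Decidable (Spec_build_mixed_py lines out) := by unfold Spec_build_mixed_py; infer_instance

-- ===== CLAIM (what is proved, stated in full; the proofs are below) =====
def Claim_equal_build_mixed_py : Prop := ∀ (lines : Int), Dom_build_mixed_py lines → Spec_build_mixed_py lines (build_mixed_py lines)

-- ===== LEMMAS AND PROOFS =====

lemma pvGrow_length (lines : Int) (c : List String) :
    lines ≤ ((pvGrow lines c).length : Int) := by
  fun_induction pvGrow lines c with
  | case1 c h ih => exact ih
  | case2 c h => omega

lemma pvGrow_getD (lines : Int) (c : List String) (i : Nat)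
    (hi : i < (pvGrow lines c).length) :
    (pvGrow lines c).getD i "" =
      if i < c.length then c.getD i "" else pvFiller.getD ((i - c.length) % 10) "" := by
  fun_induction pvGrow lines c with
  | case2 c h =>
      have : i < c.length := hi
      simp [this]
  | case1 c h ih =>
      rw [ih hi]
      have hf : pvFiller.length = 10 := by decide
      by_cases h1 : i < c.length
      · simp [h1, List.getD, List.getElem?_append_left h1]
        omega
      · by_cases h2 : i < c.length + 10
        · have h2' : i < (c ++ pvFiller).length := by simp [hf]; omega
          have h3 : ¬ i < c.length := h1
          have hm : (i - c.length) % 10 = i - c.length := Nat.mod_eq_of_lt (by omega)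
          simp only [hf, List.length_append] at *
          rw [if_pos (by omega), if_neg h3, hm]
          simp [List.getD, List.getElem?_append_right (by omega : c.length ≤ i)]
        · have h3 : ¬ i < (c ++ pvFiller).length ∨ True := Or.inr trivial
          simp only [List.length_append, hf]
          rw [if_neg (by omega), if_neg h1]
          congr 1
          omega

lemma pvGrow_take (lines : Int) (hl : 20 ≤ lines) :
    (pvGrow lines pvHeader).take lines.toNat =
      (List.range lines.toNat).map (fun i =>
        if i < pvHeader.length then pvHeader.getD i ""
        else pvFiller.getD ((i - pvHeader.length) % pvFiller.length) "") := by
  have hh : pvHeader.length = 24 := by decide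
  have hf : pvFiller.length = 10 := by decide
  have hlen : lines.toNat ≤ (pvGrow lines pvHeader).length := by
    have := pvGrow_length lines pvHeader
    omega
  apply List.ext_getElem
  · simp [hlen]
  · intro i h1 h2
    have hi : i < lines.toNat := by simpa using h2
    have hig : i < (pvGrow lines pvHeader).length := by omega
    have := pvGrow_getD lines pvHeader i hig
    have hgd : (pvGrow lines pvHeader).getD i "" = (pvGrow lines pvHeader)[i] := by
      simp [List.getD, List.getElem?_eq_getElem hig]
    simp only [List.getElem_take, List.getElem_map, List.getElem_range, ← hgd, this, hh, hf]

-- ===== VERDICT (by name: the statement is the Claim_ definition above) =====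
theorem build_mixed_py_spec : Claim_equal_build_mixed_py := by
  intro lines _
  unfold Spec_build_mixed_py build_mixed_py build_mixed_py_alt
  simp only []
  rw [pvGrow_take (max 20 lines) (le_max_left _ _)]
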